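-- pv_equiv track=rewrite | github.com/Scherzan/you-shall-not-pass | code_scanners_examples/bad_complexity.py | very_high_complexity_function
-- ===== SOURCE A (Python) =====
-- def very_high_complexity_function(n):
--     count = 0
--     for i in range(n):
--         if i % 2 == 0:
--             for j in range(n):
--                 if j % 3 == 0:
--                     for k in range(n):
--                         if k % 4 == 0:
--                             count += 1
--                             for l in range(n):
--                                 if l % 5 == 0:
--                                     for m in range(n):
--                                         if m % 6 == 0:
--                                             count += 1
--                                             for o in range(n):
--                                                 if o % 7 == 0:
--                                                     count += 1
--     return count
-- ===== SOURCE B (Python) =====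
-- def very_high_complexity_function(n):
--     if n <= 0:
--         return 0
--     c = lambda d: (n + d - 1) // d  # number of multiples of d in range(n)
--     return c(2) * c(3) * c(4) * (1 + c(5) * c(6) * (1 + c(7)))
-- ===== Notes on version B (the rewrite author's own statement) =====
-- stated objective: faster
-- what changed: Replaced the six nested divisibility-gated loops by a closed-form product of ceil(n/d) multiple-counts per level: c2*c3*c4*(1 + c5*c6*(1 + c7)).
import Mathlib
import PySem

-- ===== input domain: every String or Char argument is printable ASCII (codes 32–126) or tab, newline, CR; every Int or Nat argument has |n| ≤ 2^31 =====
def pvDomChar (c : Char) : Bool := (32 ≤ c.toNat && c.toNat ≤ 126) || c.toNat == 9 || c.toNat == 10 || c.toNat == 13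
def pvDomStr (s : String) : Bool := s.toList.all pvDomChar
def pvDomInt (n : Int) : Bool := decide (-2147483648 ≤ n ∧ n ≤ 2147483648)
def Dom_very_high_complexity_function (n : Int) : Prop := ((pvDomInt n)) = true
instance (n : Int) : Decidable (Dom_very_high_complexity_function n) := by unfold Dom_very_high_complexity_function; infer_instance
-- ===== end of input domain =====

-- B replaces A's six nested divisibility-gated loops by an O(1) closed-form product of multiple-counts (objective: faster).

-- ===== PORT A =====
def very_high_complexity_function (n : Int) : Int :=
  (PySem.List.pyRange 0 n 1).foldl (fun count i =>
    if PySem.Int.mod i 2 = 0 then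
      (PySem.List.pyRange 0 n 1).foldl (fun count j =>
        if PySem.Int.mod j 3 = 0 then
          (PySem.List.pyRange 0 n 1).foldl (fun count k =>
            if PySem.Int.mod k 4 = 0 then
              (PySem.List.pyRange 0 n 1).foldl (fun count l =>
                if PySem.Int.mod l 5 = 0 then
                  (PySem.List.pyRange 0 n 1).foldl (fun count m =>
                    if PySem.Int.mod m 6 = 0 then
                      (PySem.List.pyRange 0 n 1).foldl (fun count o =>
                        if PySem.Int.mod o 7 = 0 then count + 1 else count)
                        (count + 1)
                    else count) count
                else count) (count + 1)
            else count) count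
        else count) count
    else count) 0

-- ===== PORT B =====
def very_high_complexity_function_alt (n : Int) : Int :=
  if n ≤ 0 then 0
  else
    let c := fun d => PySem.Int.floordiv (n + d - 1) d
    c 2 * c 3 * c 4 * (1 + c 5 * c 6 * (1 + c 7))

-- ===== PRECONDITION & SPEC =====
def Spec_very_high_complexity_function (n : Int) (out : Int) : Prop := out = very_high_complexity_function_alt n
instance (n : Int) (out : Int) : Decidable (Spec_very_high_complexity_function n out) := by unfold Spec_very_high_complexity_function; infer_instance

-- ===== CLAIM (what is proved, stated in full; the proofs are below) =====
def Claim_equal_very_high_complexity_function : Prop := ∀ (n : Int), Dom_very_high_complexity_function n → Spec_very_high_complexity_function n (very_high_complexity_function n)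

-- ===== LEMMAS AND PROOFS =====

-- number of multiples of d in range(n)
def pvCnt (d n : Int) : Int := if n ≤ 0 then 0 else PySem.Int.floordiv (n + d - 1) d

lemma pvCnt_nonpos (d n : Int) (h : n ≤ 0) : pvCnt d n = 0 := by simp [pvCnt, h]

-- a loop over range(n) whose body adds a constant w exactly when the index is divisible by d
lemma fold_gate (d : Int) (h0 : ∀ n : Int, n ≤ 0 → pvCnt d n = 0)
    (hstep : ∀ n : Int, 0 < n →
      pvCnt d n = pvCnt d (n - 1) + (if PySem.Int.mod (n - 1) d = 0 then 1 else 0))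
    (w : Int) (f : Int → Int → Int)
    (hf : ∀ acc i, f acc i = if PySem.Int.mod i d = 0 then acc + w else acc) :
    ∀ (n acc : Int), (PySem.List.pyRange 0 n 1).foldl f acc = acc + pvCnt d n * w := by
  have aux : ∀ (N : Nat) (acc : Int),
      (PySem.List.pyRange 0 (N : Int) 1).foldl f acc = acc + pvCnt d (N : Int) * w := by
    intro N
    induction N with
    | zero => intro acc; simp [PySem.List.pyRange_one_eq_nil (le_refl 0), h0 0 (le_refl 0)]
    | succ N ih =>
        intro acc
        have hcast : ((N + 1 : Nat) : Int) = (N : Int) + 1 := by push_cast; ring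
        rw [hcast, PySem.List.pyRange_one_succ_right (by exact_mod_cast Nat.zero_le N),
          List.foldl_append, ih, List.foldl_cons, List.foldl_nil, hf,
          hstep ((N : Int) + 1) (by positivity)]
        have : ((N : Int) + 1 - 1) = (N : Int) := by ring
        rw [this]
        split_ifs <;> ring
  intro n acc
  by_cases h : n ≤ 0
  · simp [PySem.List.pyRange_one_eq_nil h, h0 n h]
  · have h' : (0:Int) < n := by omega
    have : n = ((n.toNat : Nat) : Int) := (Int.toNat_of_nonneg h'.le).symm
    rw [this]; exact aux n.toNat acc

lemma pvCnt_step (d : Int) (hd : 0 < d) : ∀ n : Int, 0 < n →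
    pvCnt d n = pvCnt d (n - 1) + (if PySem.Int.mod (n - 1) d = 0 then 1 else 0) := by
  intro n hn
  simp only [pvCnt, PySem.Int.floordiv_eq_ediv_of_pos hd, PySem.Int.mod_eq_emod_of_pos hd]
  have h1 : (n + d - 1) / d = (n - 1) / d + 1 := by
    have e : n + d - 1 = (n - 1) + 1 * d := by ring
    rw [e, Int.add_mul_ediv_right _ _ (by omega)]
  by_cases hn1 : n = 1
  · subst hn1
    have e : (1:Int) + d - 1 = d := by ring
    rw [e, Int.ediv_self (by omega)]
    norm_num
  · have hn2 : 2 ≤ n := by omega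
    rw [if_neg (by omega : ¬ n ≤ 0), if_neg (by omega : ¬ n - 1 ≤ 0), h1]
    have h2 : (n - 1 + d - 1) / d = (n - 2) / d + 1 := by
      have e : n - 1 + d - 1 = (n - 2) + 1 * d := by ring
      rw [e, Int.add_mul_ediv_right _ _ (by omega)]
    rw [h2]
    by_cases hdvd : (n - 1) % d = 0
    · rw [if_pos hdvd]
      obtain ⟨q, hq⟩ : ∃ q, n - 1 = d * q :=
        ⟨(n - 1) / d, by have h := Int.mul_ediv_add_emod (n - 1) d; linarith [h, hdvd]⟩
      have hq1 : 1 ≤ q := by nlinarith [hq, hn2, hd]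
      have e1 : (n - 1) / d = q := by rw [hq, Int.mul_ediv_cancel_left _ (by omega)]
      have e2 : (n - 2) / d = q - 1 := by
        have e : n - 2 = (d - 1) + (q - 1) * d := by linear_combination hq
        rw [e, Int.add_mul_ediv_right _ _ (by omega), Int.ediv_eq_zero_of_lt (by omega) (by omega)]
        ring
      rw [e1, e2]; ring
    · rw [if_neg hdvd]
      have hr0 : 0 ≤ (n - 1) % d := Int.emod_nonneg _ (by omega)
      have hrd : (n - 1) % d < d := Int.emod_lt_of_pos _ hd
      have hdm : d * ((n - 1) / d) + (n - 1) % d = n - 1 := Int.mul_ediv_add_emod _ _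
      set q := (n - 1) / d with hqdef
      set r := (n - 1) % d with hrdef
      have e2 : (n - 2) / d = q := by
        have e : n - 2 = (r - 1) + q * d := by linear_combination -hdm
        rw [e, Int.add_mul_ediv_right _ _ (by omega), Int.ediv_eq_zero_of_lt (by omega) (by omega)]
        ring
      rw [e2]; ring

lemma loop7 (n acc : Int) :
    (PySem.List.pyRange 0 n 1).foldl
      (fun count o => if PySem.Int.mod o 7 = 0 then count + 1 else count) acc
      = acc + pvCnt 7 n := by
  refine Eq.trans (fold_gate 7 (fun n h => pvCnt_nonpos 7 n h) (pvCnt_step 7 (by norm_num)) 1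
    _ ?_ n acc) (by ring)
  intro acc i
  beta_reduce
  split_ifs with h <;> ring

lemma loop6 (n acc : Int) :
    (PySem.List.pyRange 0 n 1).foldl
      (fun count m =>
        if PySem.Int.mod m 6 = 0 then
          (PySem.List.pyRange 0 n 1).foldl
            (fun count o => if PySem.Int.mod o 7 = 0 then count + 1 else count)
            (count + 1)
        else count) acc
      = acc + pvCnt 6 n * (1 + pvCnt 7 n) := by
  refine Eq.trans (fold_gate 6 (fun n h => pvCnt_nonpos 6 n h) (pvCnt_step 6 (by norm_num))
    (1 + pvCnt 7 n) _ ?_ n acc) (by ring)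
  intro acc i
  beta_reduce
  split_ifs with h
  · rw [loop7]; ring
  · rfl

lemma loop5 (n acc : Int) :
    (PySem.List.pyRange 0 n 1).foldl
      (fun count l =>
        if PySem.Int.mod l 5 = 0 then
          (PySem.List.pyRange 0 n 1).foldl
            (fun count m =>
              if PySem.Int.mod m 6 = 0 then
                (PySem.List.pyRange 0 n 1).foldl
                  (fun count o => if PySem.Int.mod o 7 = 0 then count + 1 else count)
                  (count + 1)
              else count) count
        else count) acc
      = acc + pvCnt 5 n * (pvCnt 6 n * (1 + pvCnt 7 n)) := by
  refine Eq.trans (fold_gate 5 (fun n h => pvCnt_nonpos 5 n h) (pvCnt_step 5 (by norm_num))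
    (pvCnt 6 n * (1 + pvCnt 7 n)) _ ?_ n acc) (by ring)
  intro acc i
  beta_reduce
  split_ifs with h
  · rw [loop6]
  · rfl

lemma loop4 (n acc : Int) :
    (PySem.List.pyRange 0 n 1).foldl
      (fun count k =>
        if PySem.Int.mod k 4 = 0 then
          (PySem.List.pyRange 0 n 1).foldl
            (fun count l =>
              if PySem.Int.mod l 5 = 0 then
                (PySem.List.pyRange 0 n 1).foldl
                  (fun count m =>
                    if PySem.Int.mod m 6 = 0 then
                      (PySem.List.pyRange 0 n 1).foldl
                        (fun count o => if PySem.Int.mod o 7 = 0 then count + 1 else count)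
                        (count + 1)
                    else count) count
              else count) (count + 1)
        else count) acc
      = acc + pvCnt 4 n * (1 + pvCnt 5 n * (pvCnt 6 n * (1 + pvCnt 7 n))) := by
  refine Eq.trans (fold_gate 4 (fun n h => pvCnt_nonpos 4 n h) (pvCnt_step 4 (by norm_num))
    (1 + pvCnt 5 n * (pvCnt 6 n * (1 + pvCnt 7 n))) _ ?_ n acc) (by ring)
  intro acc i
  beta_reduce
  split_ifs with h
  · rw [loop5]; ring
  · rfl

lemma loop3 (n acc : Int) :
    (PySem.List.pyRange 0 n 1).foldl
      (fun count j =>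
        if PySem.Int.mod j 3 = 0 then
          (PySem.List.pyRange 0 n 1).foldl
            (fun count k =>
              if PySem.Int.mod k 4 = 0 then
                (PySem.List.pyRange 0 n 1).foldl
                  (fun count l =>
                    if PySem.Int.mod l 5 = 0 then
                      (PySem.List.pyRange 0 n 1).foldl
                        (fun count m =>
                          if PySem.Int.mod m 6 = 0 then
                            (PySem.List.pyRange 0 n 1).foldl
                              (fun count o => if PySem.Int.mod o 7 = 0 then count + 1 else count)
                              (count + 1)
                          else count) count
                    else count) (count + 1)
              else count) count
        else count) acc
      = acc + pvCnt 3 n * (pvCnt 4 n * (1 + pvCnt 5 n * (pvCnt 6 n * (1 + pvCnt 7 n)))) := by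
  refine Eq.trans (fold_gate 3 (fun n h => pvCnt_nonpos 3 n h) (pvCnt_step 3 (by norm_num))
    (pvCnt 4 n * (1 + pvCnt 5 n * (pvCnt 6 n * (1 + pvCnt 7 n)))) _ ?_ n acc) (by ring)
  intro acc i
  beta_reduce
  split_ifs with h
  · rw [loop4]
  · rfl

lemma a_closed (n : Int) :
    very_high_complexity_function n
      = pvCnt 2 n * (pvCnt 3 n * (pvCnt 4 n * (1 + pvCnt 5 n * (pvCnt 6 n * (1 + pvCnt 7 n))))) := by
  unfold very_high_complexity_function
  refine Eq.trans (fold_gate 2 (fun n h => pvCnt_nonpos 2 n h) (pvCnt_step 2 (by norm_num))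
    (pvCnt 3 n * (pvCnt 4 n * (1 + pvCnt 5 n * (pvCnt 6 n * (1 + pvCnt 7 n))))) _ ?_ n 0) (by ring)
  intro acc i
  beta_reduce
  split_ifs with h
  · rw [loop3]
  · rfl

-- ===== VERDICT (by name: the statement is the Claim_ definition above) =====
theorem very_high_complexity_function_spec : Claim_equal_very_high_complexity_function := by
  intro n _
  unfold Spec_very_high_complexity_function
  rw [a_closed]
  unfold very_high_complexity_function_alt
  by_cases h : n ≤ 0
  · simp [pvCnt_nonpos _ _ h, h]
  · simp only [if_neg h, pvCnt]
    ring
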